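-- pv_equiv track=rewrite | github.com/EdsonEddy/perfilTesis2 | workspace_thesis/2_RKRGST/codesight_python/py-tests/1408/148702.py | edwin
-- ===== SOURCE A (Python) =====
-- def edwin(t):
--     a = []
--     sw = 1
--     for i in range(t):
--
--         if i %2==0:
--             a.append("B")
--         else:
--             if sw == 1:
--                 a.append("A")
--                 x = 1
--                 sw = sw + x
--             elif sw == 2:
--                 a.append("C")
--                 x = 1
--                 sw = sw - x
--     return a
-- ===== SOURCE B (Python) =====
-- def edwin(t):
--     # the output is the period-4 pattern B A B C tiled and truncated to length t
--     n = max(t, 0)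
--     return (["B", "A", "B", "C"] * ((n + 3) // 4))[:n]
-- ===== Notes on version B (the rewrite author's own statement) =====
-- stated objective: simpler
-- what changed: Replaces the stateful even/odd loop with its 'sw' toggle by tiling the period-4 pattern ['B','A','B','C'] with list multiplication and truncating to length max(t,0).
import Mathlib
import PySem

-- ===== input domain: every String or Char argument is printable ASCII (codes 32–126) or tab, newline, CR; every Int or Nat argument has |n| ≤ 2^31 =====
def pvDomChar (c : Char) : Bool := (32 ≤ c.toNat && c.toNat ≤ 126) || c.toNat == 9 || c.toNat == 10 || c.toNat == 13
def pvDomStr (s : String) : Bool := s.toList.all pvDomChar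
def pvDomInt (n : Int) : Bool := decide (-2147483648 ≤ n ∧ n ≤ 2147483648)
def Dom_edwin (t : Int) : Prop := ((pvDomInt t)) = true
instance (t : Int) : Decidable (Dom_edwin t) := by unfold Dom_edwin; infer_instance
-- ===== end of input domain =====

-- B replaces A's stateful even/odd loop (with its 'sw' toggle) by tiling the period-4
-- pattern ["B","A","B","C"] and truncating to length max(t,0); objective: simpler.

-- ===== PORT A =====
-- one loop iteration: state is (a, sw)
def edwinStep (st : List String × Int) (i : Int) : List String × Int :=
  if PySem.Int.mod i 2 = 0 then (st.1 ++ ["B"], st.2)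
  else if st.2 = 1 then (st.1 ++ ["A"], st.2 + 1)
  else if st.2 = 2 then (st.1 ++ ["C"], st.2 - 1)
  else st

def edwin (t : Int) : List String :=
  ((PySem.List.pyRange 0 t 1).foldl edwinStep ([], 1)).1

-- ===== PORT B =====
def edwin_alt (t : Int) : List String :=
  let n : Int := max t 0
  PySem.List.slice
    (List.flatten (List.replicate ((PySem.Int.floordiv (n + 3) 4).toNat) ["B", "A", "B", "C"]))
    none (some n)

-- ===== PRECONDITION & SPEC =====
def Spec_edwin (t : Int) (out : List String) : Prop := out = edwin_alt t
instance (t : Int) (out : List String) : Decidable (Spec_edwin t out) := by unfold Spec_edwin; infer_instance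

-- ===== CLAIM (what is proved, stated in full; the proofs are below) =====
def Claim_equal_edwin : Prop := ∀ (t : Int), Dom_edwin t → Spec_edwin t (edwin t)

-- ===== LEMMAS AND PROOFS =====

-- the k-th produced element
def edwinCell (k : Nat) : String :=
  if k % 4 = 0 then "B" else if k % 4 = 1 then "A" else if k % 4 = 2 then "B" else "C"

-- value of A's 'sw' before processing index k
def edwinSw (k : Nat) : Int := if k % 4 = 2 ∨ k % 4 = 3 then 2 else 1

lemma edwinCell_period (i : Nat) : edwinCell (4 + i) = edwinCell i := by
  simp [edwinCell, Nat.add_mod_left]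

lemma edwin_loop (n : Nat) :
    (PySem.List.pyRange 0 (n : Int) 1).foldl edwinStep ([], 1)
      = ((List.range n).map edwinCell, edwinSw n) := by
  induction n with
  | zero =>
    rw [PySem.List.pyRange_one_eq_nil (by simp)]
    simp [edwinSw]
  | succ n ih =>
    rw [show ((n + 1 : Nat) : Int) = (n : Int) + 1 by push_cast; ring,
        PySem.List.pyRange_one_succ_right (by positivity), List.foldl_append, ih]
    simp only [List.foldl_cons, List.foldl_nil, List.range_succ, List.map_append, List.map_cons,
      List.map_nil]
    rcases (by omega : n % 4 = 0 ∨ n % 4 = 1 ∨ n % 4 = 2 ∨ n % 4 = 3) with h | h | h | h <;>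
      simp [edwinStep, edwinCell, edwinSw, h,
        (by omega : (n + 1) % 4 = (n % 4 + 1) % 4)] <;> omega

lemma edwin_tile_take (k : Nat) : ∀ n : Nat, n ≤ 4 * k →
    (List.flatten (List.replicate k ["B", "A", "B", "C"])).take n = (List.range n).map edwinCell := by
  induction k with
  | zero => intro n hn; interval_cases n; simp
  | succ k ih =>
    intro n hn
    rw [List.replicate_succ, List.flatten_cons, List.take_append]
    by_cases h4 : n ≤ 4
    · interval_cases n <;> simp [ih 0 (by omega), edwinCell] <;> decide
    · have hsplit : n = 4 + (n - 4) := by omega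
      rw [show (["B", "A", "B", "C"] : List String).length = 4 from rfl, ih (n - 4) (by omega)]
      conv_rhs => rw [hsplit]
      rw [List.range_add, List.map_append, List.map_map]
      have : (List.range (n - 4)).map (edwinCell ∘ (4 + ·)) = (List.range (n - 4)).map edwinCell :=
        List.map_congr_left (fun i _ => edwinCell_period i)
      rw [this]
      rw [List.take_of_length_le (by simp; omega)]
      rw [show (List.range 4).map edwinCell = ["B", "A", "B", "C"] from rfl]

lemma edwin_alt_natCast (n : Nat) :
    edwin_alt (n : Int) = (List.range n).map edwinCell := by
  unfold edwin_alt
  have hmax : max (n : Int) 0 = (n : Int) := by simp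
  simp only [hmax]
  rw [show ((n : Int) + 3) = (((n + 3 : Nat)) : Int) by push_cast; ring,
      show (4 : Int) = ((4 : Nat) : Int) by norm_num,
      PySem.Int.floordiv_natCast, PySem.List.slice_to_natCast]
  simp only [Int.toNat_natCast]
  exact edwin_tile_take ((n + 3) / 4) n (by omega)

-- ===== VERDICT (by name: the statement is the Claim_ definition above) =====
theorem edwin_spec : Claim_equal_edwin := by
  intro t _
  unfold Spec_edwin
  rcases le_or_gt t 0 with ht | ht
  · have h0 : edwin t = [] := by
      unfold edwin
      rw [PySem.List.pyRange_one_eq_nil ht]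
      rfl
    have h1 : edwin_alt t = [] := by
      unfold edwin_alt
      have hmax : max t 0 = (0 : Int) := by omega
      simp only [hmax]
      rw [show ((0 : Int) + 3) = (((3 : Nat)) : Int) by norm_num,
          show (4 : Int) = ((4 : Nat) : Int) by norm_num, PySem.Int.floordiv_natCast]
      decide
    rw [h0, h1]
  · obtain ⟨n, rfl⟩ : ∃ n : Nat, t = (n : Int) := ⟨t.toNat, (Int.toNat_of_nonneg (by omega)).symm⟩
    rw [edwin_alt_natCast]
    unfold edwin
    rw [edwin_loop]
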